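-- pv_equiv track=rewrite | github.com/marianoOca/tesis | base.py | discrepancy
-- ===== SOURCE A (Python) =====
-- def Kadane_for_2(seq:str, pos:str, neg:str) -> int:
--     res = 0
--     maxEnding = 0
--
--     for i in range(len(seq)):
--         to_add = 1 if seq[i] == pos else (-1 if seq[i] == neg else 0)
--         maxEnding = max(maxEnding + to_add, to_add)
--
--         res = max(res, maxEnding)
--
--     return res
--
-- def discrepancy(seq:str) -> int:
--     alphabet = {"A", "C", "D", "E", "F", "G", "H", "I", "K", "L", "M", "N", "P", "Q", "R", "S", "T", "V", "W", "Y"}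
--     res = 0
--
--     for i in alphabet:
--         remaining_alphabet = alphabet - {i}
--         for j in remaining_alphabet:
--             res = max(res, Kadane_for_2(seq, i, j))
--
--     return res
-- ===== SOURCE B (Python) =====
-- ALPHABET = "ACDEFGHIKLMNPQRSTVWY"
--
-- def discrepancy(seq: str) -> int:
--     best = 0
--     for p in ALPHABET:
--         for q in ALPHABET:
--             if q == p:
--                 continue
--             # prefix-sum max-subarray: running cumulative value and its minimum so far
--             cum = 0
--             min_cum = 0
--             for c in seq:
--                 cum += 1 if c == p else (-1 if c == q else 0)
--                 if cum - min_cum > best: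
--                     best = cum - min_cum
--                 if cum < min_cum:
--                     min_cum = cum
--     return best
-- ===== Notes on version B (the rewrite author's own statement) =====
-- stated objective: faster
-- what changed: Per letter pair the Kadane reset recurrence over seq[i] indexing is replaced by a prefix-sum scan (running cumulative value minus its minimum so far) iterating the string directly, threading one shared accumulator, and the pair loop runs over a fixed alphabet string with a continue instead of building a set difference per outer letter.
import Mathlib
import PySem

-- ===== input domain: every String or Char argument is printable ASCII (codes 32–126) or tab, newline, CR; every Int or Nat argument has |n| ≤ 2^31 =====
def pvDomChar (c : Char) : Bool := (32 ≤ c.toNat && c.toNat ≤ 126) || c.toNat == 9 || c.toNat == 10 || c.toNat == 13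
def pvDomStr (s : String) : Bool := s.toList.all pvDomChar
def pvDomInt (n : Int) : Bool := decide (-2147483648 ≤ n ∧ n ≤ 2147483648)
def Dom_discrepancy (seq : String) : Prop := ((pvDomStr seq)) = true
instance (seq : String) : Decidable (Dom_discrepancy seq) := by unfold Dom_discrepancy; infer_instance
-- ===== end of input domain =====

-- B replaces the per-pair Kadane recurrence by a prefix-sum scan (cumulative value minus its
-- running minimum) threading one shared accumulator, and iterates pairs from a fixed alphabet
-- string with a `continue` instead of building a set difference per outer letter (constant-factor
-- speedup measured: no per-character indexing and no per-pair set building).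

-- ===== PORT A =====

-- A's alphabet set literal (elements in source order; the result, a max over pairs,
-- does not depend on the set's iteration order, so folding the Set's element list is exact).
def pvAlphabetA : PySem.Set String :=
  PySem.Set.ofList ["A", "C", "D", "E", "F", "G", "H", "I", "K", "L", "M", "N", "P", "Q", "R", "S", "T", "V", "W", "Y"]

-- the body of Kadane_for_2's loop; seq[i] is a 1-char string compared with pos/neg; state (res, maxEnding)
def pvKStep (pos neg : String) (st : Int × Int) (c : Char) : Int × Int :=
  let toAdd : Int := if String.ofList [c] = pos then 1 else if String.ofList [c] = neg then -1 else 0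
  let maxEnding := max (st.2 + toAdd) toAdd
  (max st.1 maxEnding, maxEnding)

def kadaneFor2 (seq : String) (pos neg : String) : Int :=
  (seq.toList.foldl (pvKStep pos neg) (0, 0)).1

def discrepancy (seq : String) : Int :=
  pvAlphabetA.foldl
    (fun res i =>
      (PySem.Set.diff pvAlphabetA [i]).foldl
        (fun res j => max res (kadaneFor2 seq i j)) res)
    0

-- ===== PORT B =====

def pvAlphabetB : String := "ACDEFGHIKLMNPQRSTVWY"

-- the body of Source B's innermost loop: state (best, cum, min_cum)
def pvBStep (p q : Char) (st : Int × Int × Int) (c : Char) : Int × Int × Int :=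
  let cum := st.2.1 + (if c = p then 1 else if c = q then -1 else 0)
  let best := if cum - st.2.2 > st.1 then cum - st.2.2 else st.1
  let minCum := if cum < st.2.2 then cum else st.2.2
  (best, cum, minCum)

def pvScanB (seq : List Char) (p q : Char) (st : Int × Int × Int) : Int × Int × Int :=
  seq.foldl (pvBStep p q) st

def discrepancy_alt (seq : String) : Int :=
  pvAlphabetB.toList.foldl
    (fun best p =>
      pvAlphabetB.toList.foldl
        (fun best q =>
          if q = p then best
          else (pvScanB seq.toList p q (best, 0, 0)).1)
        best)
    0

-- ===== PRECONDITION & SPEC =====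
def Spec_discrepancy (seq : String) (out : Int) : Prop := out = discrepancy_alt seq
instance (seq : String) (out : Int) : Decidable (Spec_discrepancy seq out) := by unfold Spec_discrepancy; infer_instance

-- ===== CLAIM (what is proved, stated in full; the proofs are below) =====
def Claim_equal_discrepancy : Prop := ∀ (seq : String), Dom_discrepancy seq → Spec_discrepancy seq (discrepancy seq)

-- ===== LEMMAS AND PROOFS =====

-- single-char strings compare like their characters
theorem pvOfList_inj (c x : Char) : (String.ofList [c] = String.ofList [x]) = (c = x) := by
  simp [String.ext_iff]

-- loop invariant linking the two inner loops: cum - minCum = max maxEnding 0 and equal bests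
theorem pvScan_eq_foldK (cs : List Char) (p q : Char) :
    ∀ (res m best cum minCum : Int), cum - minCum = max m 0 → res = best →
    (cs.foldl (pvKStep (String.ofList [p]) (String.ofList [q])) (res, m)).1
      = (cs.foldl (pvBStep p q) (best, cum, minCum)).1 := by
  induction cs with
  | nil => intro res m best cum minCum _ hres; simpa using hres
  | cons c cs ih =>
    intro res m best cum minCum hinv hres
    simp only [List.foldl_cons, pvKStep, pvBStep, pvOfList_inj]
    set t : Int := if c = p then 1 else if c = q then -1 else 0 with ht
    have hme : cum + t - minCum = max (m + t) t := by
      simp only [max_def] at hinv ⊢; split_ifs at hinv ⊢ <;> omega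
    apply ih
    · -- new invariant
      simp only [max_def] at hme ⊢
      split_ifs at hme ⊢ <;> omega
    · -- equal bests
      subst hres
      simp only [max_def] at hme ⊢
      split_ifs at hme ⊢ <;> omega

-- the Kadane fold's res component shifts by max with the initial value
theorem pvFoldK_shift (cs : List Char) (pos neg : String) :
    ∀ (r s m : Int),
    (cs.foldl (pvKStep pos neg) (max r s, m)).1 = max r (cs.foldl (pvKStep pos neg) (s, m)).1 := by
  induction cs with
  | nil => intro r s m; rfl
  | cons c cs ih =>
    intro r s m
    simp only [List.foldl_cons, pvKStep]
    rw [max_assoc]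
    exact ih r _ _

-- one pair: A's max-with-Kadane step equals B's scan step (for a nonnegative accumulator)
theorem pvPair_eq (seq : String) (p q : Char) (best : Int) (hb : 0 ≤ best) :
    max best (kadaneFor2 seq (String.ofList [p]) (String.ofList [q]))
      = (pvScanB seq.toList p q (best, 0, 0)).1 := by
  unfold kadaneFor2 pvScanB
  rw [← pvFoldK_shift seq.toList _ _ best 0 0, max_eq_left hb]
  exact pvScan_eq_foldK seq.toList p q best 0 best 0 0 (by simp) rfl

-- the inner loops agree: A folds over the filtered single-char strings, B skips with `continue`
theorem pvInner_eq (seq : String) (p : Char) (qs : List Char) :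
    ∀ (r : Int), 0 ≤ r →
    ((qs.filter (fun q => q ≠ p)).map (fun q => String.ofList [q])).foldl
        (fun res j => max res (kadaneFor2 seq (String.ofList [p]) j)) r
      = qs.foldl
        (fun best q => if q = p then best else (pvScanB seq.toList p q (best, 0, 0)).1) r := by
  induction qs with
  | nil => intro r _; rfl
  | cons q qs ih =>
    intro r hr
    simp only [List.foldl_cons, List.filter_cons]
    by_cases h : q = p
    · simp only [h]
      simpa using ih r hr
    · simp only [h, decide_not, decide_false, Bool.not_false, if_true, if_false,
        List.map_cons, List.foldl_cons]
      rw [← pvPair_eq seq p q r hr]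
      simp only [← decide_not]
      exact ih _ (le_trans hr (le_max_left _ _))

-- an accumulator folded with max only grows
theorem pvFoldMax_ge {α : Type} (f : α → Int) (l : List α) (r : Int) :
    r ≤ l.foldl (fun res j => max res (f j)) r := by
  rw [show (fun (res : Int) j => max res (f j)) = (fun res j => max res (id (f j))) from rfl,
    ← List.foldl_map]
  exact (PySem.List.le_foldl_max (l.map (fun j => id (f j))) r).1

-- mapping single-char string construction commutes with filtering out one letter
theorem pvFilter_map (p : Char) (qs : List Char) :
    ((qs.map (fun q => String.ofList [q])).filter (fun x => x ≠ String.ofList [p]))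
      = (qs.filter (fun q => q ≠ p)).map (fun q => String.ofList [q]) := by
  rw [List.filter_map]
  have hpred : ((fun x => decide (x ≠ String.ofList [p])) ∘ fun q => String.ofList [q])
      = fun q => decide (q ≠ p) := by
    funext q
    simp [pvOfList_inj]
  rw [hpred]

-- A's alphabet set is B's alphabet string, letter by letter
theorem pvAlphabet_eq : pvAlphabetA = pvAlphabetB.toList.map (fun c => String.ofList [c]) := by
  decide

-- the outer loops agree
theorem pvOuter_eq (seq : String) (ps : List Char) :
    ∀ (r : Int), 0 ≤ r →
    (ps.map (fun c => String.ofList [c])).foldl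
        (fun res i =>
          (PySem.Set.diff pvAlphabetA [i]).foldl
            (fun res j => max res (kadaneFor2 seq i j)) res)
        r
      = ps.foldl
        (fun best p =>
          pvAlphabetB.toList.foldl
            (fun best q => if q = p then best else (pvScanB seq.toList p q (best, 0, 0)).1)
            best)
        r := by
  induction ps with
  | nil => intro r _; rfl
  | cons p ps ih =>
    intro r hr
    simp only [List.map_cons, List.foldl_cons]
    have hdiff : PySem.Set.diff pvAlphabetA [String.ofList [p]]
        = (pvAlphabetB.toList.filter (fun q => q ≠ p)).map (fun q => String.ofList [q]) := by
      rw [pvAlphabet_eq, ← pvFilter_map]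
      simp [PySem.Set.diff]
    rw [hdiff, pvInner_eq seq p pvAlphabetB.toList r hr]
    have hge : r ≤ pvAlphabetB.toList.foldl
        (fun best q => if q = p then best else (pvScanB seq.toList p q (best, 0, 0)).1) r := by
      rw [← pvInner_eq seq p pvAlphabetB.toList r hr]
      exact pvFoldMax_ge _ _ r
    exact ih _ (le_trans hr hge)

-- ===== VERDICT (by name: the statement is the Claim_ definition above) =====
theorem discrepancy_spec : Claim_equal_discrepancy := by
  intro seq _
  unfold Spec_discrepancy discrepancy discrepancy_alt
  rw [show pvAlphabetA.foldl
        (fun res i => (PySem.Set.diff pvAlphabetA [i]).foldl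
          (fun res j => max res (kadaneFor2 seq i j)) res) 0
      = (pvAlphabetB.toList.map (fun c => String.ofList [c])).foldl
        (fun res i => (PySem.Set.diff pvAlphabetA [i]).foldl
          (fun res j => max res (kadaneFor2 seq i j)) res) 0 from by rw [← pvAlphabet_eq]]
  exact pvOuter_eq seq pvAlphabetB.toList 0 le_rfl
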